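-- pv_equiv track=rewrite | github.com/jiedi720/CorpusSearchTool | function/result_processor.py | get_highlight_positions
-- ===== SOURCE A (Python) =====
-- from typing import List, Dict, Any
--
-- def get_highlight_positions(content: str, matched_keywords: List[str]) -> List[tuple]:
--     """
--     获取关键词在内容中的位置信息，用于GUI高亮显示
--
--     Args:
--         content: 原始内容
--         matched_keywords: 匹配的关键词列表
--
--     Returns:
--         位置信息列表 [(keyword, start_pos, end_pos), ...]
--     """
--     positions = []
--     for keyword in matched_keywords:
--         start = 0
--         while True:
--             pos = content.find(keyword, start)
--             if pos == -1:
--                 break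
--             positions.append((keyword, pos, pos + len(keyword)))
--             start = pos + 1
--     return positions
-- ===== SOURCE B (Python) =====
-- def get_highlight_positions(content, matched_keywords):
--     positions = []
--     for keyword in matched_keywords:
--         for i in range(len(content) + 1):
--             if content.startswith(keyword, i):
--                 positions.append((keyword, i, i + len(keyword)))
--     return positions
-- ===== Notes on version B (the rewrite author's own statement) =====
-- stated objective: alternative
-- what changed: Replaces the repeated content.find with a jumping start index by a single full scan over every index 0..len(content) that tests content.startswith(keyword, i), emitting a match tuple per position.
import Mathlib
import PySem

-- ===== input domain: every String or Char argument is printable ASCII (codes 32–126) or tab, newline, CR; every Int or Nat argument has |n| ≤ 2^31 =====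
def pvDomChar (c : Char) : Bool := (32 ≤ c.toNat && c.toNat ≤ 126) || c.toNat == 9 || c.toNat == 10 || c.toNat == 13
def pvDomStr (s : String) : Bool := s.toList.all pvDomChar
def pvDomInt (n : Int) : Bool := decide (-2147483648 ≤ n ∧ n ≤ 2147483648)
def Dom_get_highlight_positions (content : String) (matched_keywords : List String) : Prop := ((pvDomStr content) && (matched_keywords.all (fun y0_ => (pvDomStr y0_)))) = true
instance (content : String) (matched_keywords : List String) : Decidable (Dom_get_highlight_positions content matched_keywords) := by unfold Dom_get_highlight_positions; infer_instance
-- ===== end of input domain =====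

-- B replaces A's repeated content.find with a jumping start by a single scan of every index
-- 0..len(content) testing content.startswith(keyword, i); alternative decomposition, same results.

-- ===== PORT A =====
-- helper lemmas cited by pvALoop's decreasing_by (needed by the port, hence above it)
theorem pvFindFrom_gt (s sub : List Char) (k : Nat) (h : s.length < k) :
    PySem.Chars.findFrom s sub (k : Int) = -1 := by
  simp [PySem.Chars.findFrom, show ¬((k : Int) < 0) from by omega,
        show (s.length : Int) < (k : Int) from by exact_mod_cast h]

theorem pvFindFrom_bounds (s sub : List Char) (k : Nat)
    (h : PySem.Chars.findFrom s sub (k : Int) ≠ -1) :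
    k ≤ (PySem.Chars.findFrom s sub (k : Int)).toNat ∧
      (PySem.Chars.findFrom s sub (k : Int)).toNat ≤ s.length := by
  have hk : k ≤ s.length := by
    by_contra hk
    exact h (pvFindFrom_gt s sub k (by omega))
  rw [PySem.Chars.findFrom_natCast s sub k hk] at h ⊢
  by_cases hf : PySem.Chars.find (s.drop k) sub = -1
  · rw [if_pos hf] at h; exact absurd rfl h
  · rw [if_neg hf]
    have h1 := PySem.Chars.neg_one_le_find (s.drop k) sub
    have h2 := PySem.Chars.find_le_length (s.drop k) sub
    have h3 : (s.drop k).length = s.length - k := List.length_drop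
    omega

-- the 'while True: pos = content.find(keyword, start); …; start = pos + 1' loop of A
def pvALoop (s : List Char) (kw : String) (start : Nat) : List (String × Int × Int) :=
  if PySem.Chars.findFrom s kw.toList (start : Int) = -1 then []
  else (kw, PySem.Chars.findFrom s kw.toList (start : Int),
        PySem.Chars.findFrom s kw.toList (start : Int) + (kw.toList.length : Int)) ::
       pvALoop s kw ((PySem.Chars.findFrom s kw.toList (start : Int)).toNat + 1)
termination_by s.length + 1 - start
decreasing_by
  have := pvFindFrom_bounds s kw.toList start (by assumption)
  omega

def get_highlight_positions (content : String) (matched_keywords : List String) : List (String × Int × Int) :=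
  matched_keywords.foldl (fun positions keyword => positions ++ pvALoop content.toList keyword 0) []

-- ===== PORT B =====
-- range(len(content)+1) ported as List.range (bounds nonnegative, step 1: exact);
-- content.startswith(keyword, i) for 0 ≤ i ≤ len(content) is exactly startswith on content[i:] (exact on this index range)
def get_highlight_positions_alt (content : String) (matched_keywords : List String) : List (String × Int × Int) :=
  matched_keywords.foldl
    (fun positions keyword =>
      (List.range (content.toList.length + 1)).foldl
        (fun acc i =>
          if PySem.Chars.startswith (content.toList.drop i) keyword.toList
          then acc ++ [(keyword, (i : Int), (i : Int) + (keyword.toList.length : Int))]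
          else acc)
        positions)
    []

-- ===== PRECONDITION & SPEC =====
def Spec_get_highlight_positions (content : String) (matched_keywords : List String) (out : List (String × Int × Int)) : Prop := out = get_highlight_positions_alt content matched_keywords
instance (content : String) (matched_keywords : List String) (out : List (String × Int × Int)) : Decidable (Spec_get_highlight_positions content matched_keywords out) := by unfold Spec_get_highlight_positions; infer_instance

-- ===== CLAIM (what is proved, stated in full; the proofs are below) =====
def Claim_equal_get_highlight_positions : Prop := ∀ (content : String) (matched_keywords : List String), Dom_get_highlight_positions content matched_keywords → Spec_get_highlight_positions content matched_keywords (get_highlight_positions content matched_keywords)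

-- ===== LEMMAS AND PROOFS =====

-- A's find-loop from 'start' produces exactly the match tuples of the indices start..len(s), in order
theorem pvALoop_eq (s : List Char) (kw : String) (fuel : Nat) :
    ∀ start : Nat, s.length + 1 - start ≤ fuel →
    pvALoop s kw start =
      ((List.range' start (s.length + 1 - start)).filter
          (fun i => PySem.Chars.startswith (s.drop i) kw.toList)).map
        (fun (i : Nat) => ((kw, (i : Int), (i : Int) + (kw.toList.length : Int)) : String × Int × Int)) := by
  induction fuel with
  | zero =>
      intro start hf
      have hs : s.length < start := by omega
      rw [pvALoop, if_pos (pvFindFrom_gt s kw.toList start hs)]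
      rw [show s.length + 1 - start = 0 from by omega]
      simp
  | succ m ih =>
      intro start hf
      rw [pvALoop]
      by_cases hpos : PySem.Chars.findFrom s kw.toList (start : Int) = -1
      · rw [if_pos hpos]
        by_cases hk : start ≤ s.length
        · have hninf : ¬ kw.toList <:+: s.drop start :=
            (PySem.Chars.findFrom_natCast_eq_neg_one_iff s kw.toList start hk).1 hpos
          symm
          rw [List.map_eq_nil_iff, List.filter_eq_nil_iff]
          intro i hi hsw
          rw [List.mem_range'_1] at hi
          rw [PySem.Chars.startswith_iff] at hsw
          apply hninf
          apply (PySem.Chars.isIn_iff_infix _ _).1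
          apply (PySem.Chars.exists_prefix_drop_iff_isIn _ _).1
          refine ⟨i - start, ?_⟩
          rw [List.drop_drop, show start + (i - start) = i from by omega]
          exact hsw
        · rw [show s.length + 1 - start = 0 from by omega]
          simp
      · rw [if_neg hpos]
        obtain ⟨h1, h2⟩ := pvFindFrom_bounds s kw.toList start hpos
        have hk : start ≤ s.length := by omega
        obtain ⟨hge, hpre, hmin⟩ :=
          PySem.Chars.findFrom_natCast_spec s kw.toList start hk hpos
        set p := (PySem.Chars.findFrom s kw.toList (start : Int)).toNat with hp
        have hcast : ((p : Int)) = PySem.Chars.findFrom s kw.toList (start : Int) := by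
          have : (0 : Int) ≤ PySem.Chars.findFrom s kw.toList (start : Int) := by
            exact le_trans (Int.natCast_nonneg start) hge
          omega
        have hsplit : List.range' start (s.length + 1 - start) =
            List.range' start (p - start) ++ p :: List.range' (p + 1) (s.length + 1 - (p + 1)) := by
          rw [show s.length + 1 - start = (p - start) + ((s.length + 1 - (p + 1)) + 1) from by omega]
          rw [← List.range'_append (s := start) (m := p - start) (n := s.length + 1 - (p + 1) + 1) (step := 1)]
          rw [show start + 1 * (p - start) = p from by omega, List.range'_succ]
        rw [hsplit, List.filter_append]
        have hfilter1 : (List.range' start (p - start)).filter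
            (fun i => PySem.Chars.startswith (s.drop i) kw.toList) = [] := by
          rw [List.filter_eq_nil_iff]
          intro i hi hsw
          rw [List.mem_range'_1] at hi
          rw [PySem.Chars.startswith_iff] at hsw
          exact hmin i hi.1 (by omega) hsw
        have hfilterp : PySem.Chars.startswith (s.drop p) kw.toList = true :=
          (PySem.Chars.startswith_iff _ _).2 hpre
        rw [hfilter1, List.filter_cons, if_pos hfilterp, List.nil_append, List.map_cons]
        rw [ih (p + 1) (by omega)]
        rw [hcast]

-- the verdict
theorem get_highlight_positions_spec : Claim_equal_get_highlight_positions := by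
  unfold Claim_equal_get_highlight_positions
  intro content matched_keywords hdom
  clear hdom
  unfold Spec_get_highlight_positions get_highlight_positions get_highlight_positions_alt
  induction matched_keywords using List.reverseRecOn with
  | nil => rfl
  | append_singleton l kw ihl =>
      rw [List.foldl_append, List.foldl_append, ← ihl]
      simp only [List.foldl_cons, List.foldl_nil]
      rw [PySem.List.foldl_append_if
            (fun i => PySem.Chars.startswith (content.toList.drop i) kw.toList)
            (fun i => (kw, (i : Int), (i : Int) + (kw.toList.length : Int)))
            (List.range (content.toList.length + 1))]
      rw [pvALoop_eq content.toList kw (content.toList.length + 1) 0 (by omega)]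
      rw [List.range_eq_range', Nat.sub_zero]
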